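-- pv_equiv track=rewrite | github.com/m1sterzer0/DaveProgrammingCompetitions | hackercup/python/2021/1_A3.py | solveBrute
-- ===== SOURCE A (Python) =====
-- MOD = 1_000_000_007
--
-- def solveA2(N,S) :
--     last = 'A'; lastidx = -1; ans = 0
--     for i,c in enumerate(S) :
--         if c in "OX" :
--             if last in "OX" and c != last :
--                 lans = (lastidx+1) * (len(S)-i) % MOD
--                 ans = (ans + lans) % MOD
--             last = c; lastidx = i
--     return ans
--
-- def solveBrute(N,S) :
--     s2 = []
--     for c in S :
--         if c == '.' :
--             s2 += s2[:]
--         else :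
--             s2.append(c)
--     S2 = ''.join(s2)
--     return solveA2(len(S2),S2)
-- ===== SOURCE B (Python) =====
-- MOD = 1_000_000_007
--
-- def solveBrute(N, S):
--     # Analytic one-pass over S: instead of materialising the doubled expansion,
--     # tracks modulo MOD its length together with the count and weighted sums
--     # of its O/X transition pairs, from which the answer is read off.
--     L = 0            # length of expansion, mod MOD
--     k = 0            # number of transition pairs, mod MOD
--     t1 = 0           # sum of (p+1) over transition pairs (p,q), mod MOD
--     tq = 0           # sum of q over transition pairs, mod MOD
--     t2 = 0           # sum of (p+1)*q over transition pairs, mod MOD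
--     first = None     # (char, position mod MOD) of first O/X in expansion
--     last = None      # (char, position mod MOD) of last O/X in expansion
--     for c in S:
--         if c == '.':
--             nk, nt1, ntq, nt2 = (2 * k) % MOD, (2 * t1 + k * L) % MOD, \
--                 (2 * tq + k * L) % MOD, (2 * t2 + L * t1 + L * tq + k * L * L) % MOD
--             if last is not None and first is not None and last[0] != first[0]:
--                 p, q = last[1], (first[1] + L) % MOD
--                 nk = (nk + 1) % MOD
--                 nt1 = (nt1 + p + 1) % MOD
--                 ntq = (ntq + q) % MOD
--                 nt2 = (nt2 + (p + 1) * q) % MOD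
--             if last is not None:
--                 last = (last[0], (last[1] + L) % MOD)
--             k, t1, tq, t2 = nk, nt1, ntq, nt2
--             L = (2 * L) % MOD
--         else:
--             if c in "OX":
--                 if last is not None and last[0] != c:
--                     k = (k + 1) % MOD
--                     t1 = (t1 + last[1] + 1) % MOD
--                     tq = (tq + L) % MOD
--                     t2 = (t2 + (last[1] + 1) * L) % MOD
--                 if first is None:
--                     first = (c, L)
--                 last = (c, L)
--             L = (L + 1) % MOD
--     return (L * t1 - t2) % MOD
-- ===== Notes on version B (the rewrite author's own statement) =====
-- stated objective: alternative
-- what changed: B never materialises the doubled string: it makes one pass over S, maintaining mod 1e9+7 the conceptual expansion's length, its first/last O-or-X occurrence, and the count and weighted sums of its O/X transition pairs, from which the answer (L*sum(p+1) - sum((p+1)*q)) mod p is read off; it trades A's explicit list doubling for constant-size modular bookkeeping.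
import Mathlib
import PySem

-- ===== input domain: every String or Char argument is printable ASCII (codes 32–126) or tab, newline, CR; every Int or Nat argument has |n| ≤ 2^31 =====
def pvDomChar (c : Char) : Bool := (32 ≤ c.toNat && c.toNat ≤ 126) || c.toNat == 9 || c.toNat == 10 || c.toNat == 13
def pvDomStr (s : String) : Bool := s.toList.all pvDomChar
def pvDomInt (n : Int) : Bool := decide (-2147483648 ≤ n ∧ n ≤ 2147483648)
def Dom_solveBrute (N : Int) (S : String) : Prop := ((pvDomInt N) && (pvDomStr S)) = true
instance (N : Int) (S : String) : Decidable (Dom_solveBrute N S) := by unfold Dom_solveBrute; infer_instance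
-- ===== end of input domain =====

-- B does not materialise the doubled string: it does one pass over S, keeping modular
-- sums over the conceptual expansion's O/X transition pairs (objective: alternative).

-- ===== PORT A =====
def pvMOD : Int := 1000000007

def pvIsOX (c : Char) : Bool := c == 'O' || c == 'X'

-- loop body of solveA2 (L = len(S) of the string being scanned)
def pvStepA (L : Int) (st : Char × Int × Int) (ic : Int × Char) : Char × Int × Int :=
  let last := st.1; let lastidx := st.2.1; let ans := st.2.2
  let i := ic.1; let c := ic.2
  if pvIsOX c then
    let ans :=
      if pvIsOX last && c != last then
        let lans := PySem.Int.mod ((lastidx + 1) * (L - i)) pvMOD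
        PySem.Int.mod (ans + lans) pvMOD
      else ans
    (c, i, ans)
  else st

def solveA2 (N : Int) (S : List Char) : Int :=
  ((PySem.List.enumerate S 0).foldl (pvStepA (S.length : Int)) ('A', -1, 0)).2.2

def solveBrute (N : Int) (S : String) : Int :=
  let s2 := S.toList.foldl (fun (s2 : List Char) c => if c == '.' then s2 ++ s2 else s2 ++ [c]) []
  solveA2 (s2.length : Int) s2

-- ===== PORT B =====
structure PvB where
  L : Int
  k : Int
  t1 : Int
  tq : Int
  t2 : Int
  first : Option (Char × Int)
  last : Option (Char × Int)
deriving Repr, DecidableEq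

def pvStepB (st : PvB) (c : Char) : PvB :=
  if c == '.' then
    let base := (PySem.Int.mod (2 * st.k) pvMOD,
                 PySem.Int.mod (2 * st.t1 + st.k * st.L) pvMOD,
                 PySem.Int.mod (2 * st.tq + st.k * st.L) pvMOD,
                 PySem.Int.mod (2 * st.t2 + st.L * st.t1 + st.L * st.tq + st.k * st.L * st.L) pvMOD)
    let upd :=
      match st.last, st.first with
      | some (lc, lp), some (fc, fp) =>
        if lc != fc then
          let q := PySem.Int.mod (fp + st.L) pvMOD
          (PySem.Int.mod (base.1 + 1) pvMOD,
           PySem.Int.mod (base.2.1 + lp + 1) pvMOD,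
           PySem.Int.mod (base.2.2.1 + q) pvMOD,
           PySem.Int.mod (base.2.2.2 + (lp + 1) * q) pvMOD)
        else base
      | _, _ => base
    let nlast :=
      match st.last with
      | some (lc, lp) => some (lc, PySem.Int.mod (lp + st.L) pvMOD)
      | none => none
    ⟨PySem.Int.mod (2 * st.L) pvMOD, upd.1, upd.2.1, upd.2.2.1, upd.2.2.2, st.first, nlast⟩
  else
    if c == 'O' || c == 'X' then
      let upd :=
        match st.last with
        | some (lc, lp) =>
          if lc != c then
            (PySem.Int.mod (st.k + 1) pvMOD,
             PySem.Int.mod (st.t1 + lp + 1) pvMOD,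
             PySem.Int.mod (st.tq + st.L) pvMOD,
             PySem.Int.mod (st.t2 + (lp + 1) * st.L) pvMOD)
          else (st.k, st.t1, st.tq, st.t2)
        | none => (st.k, st.t1, st.tq, st.t2)
      let nfirst := match st.first with
        | none => some (c, st.L)
        | some f => some f
      ⟨PySem.Int.mod (st.L + 1) pvMOD, upd.1, upd.2.1, upd.2.2.1, upd.2.2.2, nfirst, some (c, st.L)⟩
    else
      { st with L := PySem.Int.mod (st.L + 1) pvMOD }

def solveBrute_alt (N : Int) (S : String) : Int :=
  let st := S.toList.foldl pvStepB ⟨0, 0, 0, 0, 0, none, none⟩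
  PySem.Int.mod (st.L * st.t1 - st.t2) pvMOD

-- ===== PRECONDITION & SPEC =====
def Spec_solveBrute (N : Int) (S : String) (out : Int) : Prop := out = solveBrute_alt N S
instance (N : Int) (S : String) (out : Int) : Decidable (Spec_solveBrute N S out) := by unfold Spec_solveBrute; infer_instance

-- ===== CLAIM (what is proved, stated in full; the proofs are below) =====
def Claim_equal_solveBrute : Prop := ∀ (N : Int) (S : String), Dom_solveBrute N S → Spec_solveBrute N S (solveBrute N S)

-- ===== LEMMAS AND PROOFS =====

-- indexed O/X occurrences of the (conceptually expanded) list
def pvOx (l : List Char) : List (Int × Char) :=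
  (PySem.List.enumerate l 0).filter (fun p => pvIsOX p.2)

-- transition pairs (prev index, cur index), threading the previous O/X char/index
def pvPairs : Char → Int → List (Int × Char) → List (Int × Int)
  | _, _, [] => []
  | last, li, b :: rest =>
      (if pvIsOX last && b.2 != last then [(li, b.1)] else []) ++ pvPairs b.2 b.1 rest

def pvP (l : List Char) : List (Int × Int) := pvPairs 'A' (-1) (pvOx l)

def pvLastSt : Char → Int → List (Int × Char) → Char × Int
  | last, li, [] => (last, li)
  | _, _, b :: rest => pvLastSt b.2 b.1 rest

def pvCnt (ps : List (Int × Int)) : Int := (ps.length : Int)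
def pvS1 (ps : List (Int × Int)) : Int := (ps.map (fun p => p.1 + 1)).sum
def pvSq (ps : List (Int × Int)) : Int := (ps.map (fun p => p.2)).sum
def pvS2 (ps : List (Int × Int)) : Int := (ps.map (fun p => (p.1 + 1) * p.2)).sum
def pvTerm (L : Int) (ps : List (Int × Int)) : Int := (ps.map (fun p => (p.1 + 1) * (L - p.2))).sum

def pvShift (n : Int) (ps : List (Int × Char)) : List (Int × Char) := ps.map (fun p => (p.1 + n, p.2))
def pvShiftP (n : Int) (ps : List (Int × Int)) : List (Int × Int) := ps.map (fun p => (p.1 + n, p.2 + n))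

def pvInv (l : List Char) (st : PvB) : Prop :=
  st.L = (l.length : Int) % pvMOD ∧
  st.k = pvCnt (pvP l) % pvMOD ∧
  st.t1 = pvS1 (pvP l) % pvMOD ∧
  st.tq = pvSq (pvP l) % pvMOD ∧
  st.t2 = pvS2 (pvP l) % pvMOD ∧
  st.first = (pvOx l).head?.map (fun p => (p.2, p.1 % pvMOD)) ∧
  st.last = (pvOx l).getLast?.map (fun p => (p.2, p.1 % pvMOD))

theorem pvM_pos : (0 : Int) < pvMOD := by decide

theorem pvmod_eq (a : Int) : PySem.Int.mod a pvMOD = a % pvMOD :=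
  PySem.Int.mod_eq_emod_of_pos pvM_pos

theorem pv_emod_emod (a : Int) : a % pvMOD % pvMOD = a % pvMOD :=
  Int.emod_emod_of_dvd a dvd_rfl

theorem pv_addl (a b : Int) : (a % pvMOD + b) % pvMOD = (a + b) % pvMOD := by
  conv_lhs => rw [Int.add_emod, pv_emod_emod, ← Int.add_emod]

theorem pv_addr (a b : Int) : (a + b % pvMOD) % pvMOD = (a + b) % pvMOD := by
  conv_lhs => rw [Int.add_emod, pv_emod_emod, ← Int.add_emod]

-- fold characterization of solveA2
theorem pv_foldA (L : Int) (es : List (Int × Char)) :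
    ∀ (last : Char) (li ans : Int), ans % pvMOD = ans →
    es.foldl (pvStepA L) (last, li, ans) =
      ((pvLastSt last li (es.filter (fun p => pvIsOX p.2))).1,
       (pvLastSt last li (es.filter (fun p => pvIsOX p.2))).2,
       (ans + pvTerm L (pvPairs last li (es.filter (fun p => pvIsOX p.2)))) % pvMOD) := by
  induction es with
  | nil =>
      intro last li ans h
      simp [pvLastSt, pvPairs, pvTerm, h]
  | cons b rest ih =>
      intro last li ans h
      obtain ⟨i, c⟩ := b
      by_cases hc : pvIsOX c = true
      · by_cases hcond : (pvIsOX last && c != last) = true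
        · have hst : pvStepA L (last, li, ans) (i, c)
              = (c, i, (ans + ((li + 1) * (L - i)) % pvMOD) % pvMOD) := by
            simp [pvStepA, hc, hcond, pvmod_eq]
          rw [List.foldl_cons, hst, ih c i _ (pv_emod_emod _)]
          simp only [List.filter_cons, hc, decide_true, if_true]
          simp only [pvLastSt, pvPairs, hcond, if_true, pvTerm, List.map_append,
            List.sum_append, List.map_cons, List.sum_cons, List.map_nil, List.sum_nil,
            Prod.mk.injEq]
          refine ⟨trivial, trivial, ?_⟩
          rw [pv_addl,
            show ans + (li + 1) * (L - i) % pvMOD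
                + ((List.map (fun p => (p.1 + 1) * (L - p.2))
                    (pvPairs c i (List.filter (fun p => pvIsOX p.2) rest))).sum)
              = ans + ((List.map (fun p => (p.1 + 1) * (L - p.2))
                    (pvPairs c i (List.filter (fun p => pvIsOX p.2) rest))).sum)
                + (li + 1) * (L - i) % pvMOD from by ring,
            pv_addr]
          congr 1
          ring
        · have hst : pvStepA L (last, li, ans) (i, c) = (c, i, ans) := by
            simp [pvStepA, hc, hcond]
          rw [List.foldl_cons, hst, ih c i ans h]
          simp [List.filter_cons, hc, pvLastSt, pvPairs, hcond]
      · have hst : pvStepA L (last, li, ans) (i, c) = (last, li, ans) := by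
          simp [pvStepA, hc]
        rw [List.foldl_cons, hst, ih last li ans h]
        simp [List.filter_cons, hc]

theorem pvTerm_eq (L : Int) (ps : List (Int × Int)) :
    pvTerm L ps = L * pvS1 ps - pvS2 ps := by
  induction ps with
  | nil => simp [pvTerm, pvS1, pvS2]
  | cons p ps ih => simp [pvTerm, pvS1, pvS2] at *; rw [ih]; ring

theorem pv_solveA2 (n : Int) (l : List Char) :
    solveA2 n l = ((l.length : Int) * pvS1 (pvP l) - pvS2 (pvP l)) % pvMOD := by
  unfold solveA2
  rw [pv_foldA (l.length : Int) (PySem.List.enumerate l 0) 'A' (-1) 0 (by simp)]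
  show (0 + pvTerm _ (pvPairs 'A' (-1) (pvOx l))) % pvMOD = _
  rw [zero_add, pvTerm_eq]
  rfl

theorem pv_enum_shift {α : Type} (xs : List α) : ∀ (s t : Int),
    PySem.List.enumerate xs (s + t) = (PySem.List.enumerate xs s).map (fun p => (p.1 + t, p.2)) := by
  induction xs with
  | nil => intro s t; simp [PySem.List.enumerate_nil]
  | cons x xs ih =>
      intro s t
      rw [PySem.List.enumerate_cons, PySem.List.enumerate_cons, List.map_cons,
        show s + t + 1 = (s + 1) + t by ring, ih]

theorem pv_ox_append (l l' : List Char) :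
    pvOx (l ++ l') = pvOx l ++ pvShift (l.length : Int) (pvOx l') := by
  unfold pvOx pvShift
  rw [PySem.List.enumerate_append, List.filter_append,
    show ((0 : Int) + l.length) = 0 + (l.length : Int) from rfl,
    pv_enum_shift l' 0 (l.length : Int), List.filter_map]
  rfl

theorem pv_pairs_append (xs : List (Int × Char)) : ∀ (ys : List (Int × Char)) (last : Char) (li : Int),
    pvPairs last li (xs ++ ys)
      = pvPairs last li xs ++ pvPairs (pvLastSt last li xs).1 (pvLastSt last li xs).2 ys := by
  induction xs with
  | nil => intro ys last li; simp [pvPairs, pvLastSt]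
  | cons b xs ih =>
      intro ys last li
      simp only [List.cons_append, pvPairs, pvLastSt, ih, List.append_assoc]

theorem pv_pairs_shift (ys : List (Int × Char)) : ∀ (last : Char) (li n : Int),
    pvPairs last (li + n) (pvShift n ys) = pvShiftP n (pvPairs last li ys) := by
  induction ys with
  | nil => intro last li n; simp [pvPairs, pvShift, pvShiftP]
  | cons b ys ih =>
      intro last li n
      simp only [pvShift, List.map_cons, pvPairs, ih, pvShiftP, List.map_append]
      by_cases hb : (pvIsOX last && b.2 != last) = true
      · simp only [hb, if_true]
        simpa [pvShift, pvShiftP] using ih b.2 b.1 n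
      · simp only [hb, if_false]
        simpa [pvShift, pvShiftP] using ih b.2 b.1 n

theorem pv_lastSt_getLast? (xs : List (Int × Char)) : ∀ (last : Char) (li : Int),
    pvLastSt last li xs = xs.getLast?.elim (last, li) (fun b => (b.2, b.1)) := by
  induction xs with
  | nil => intro last li; simp [pvLastSt]
  | cons b xs ih =>
      intro last li
      cases xs with
      | nil => simp [pvLastSt]
      | cons b' xs' =>
          rw [pvLastSt, ih, List.getLast?_cons_cons]
          rcases e : (b' :: xs').getLast? with _ | a
          · exact absurd (List.getLast?_eq_none_iff.mp e) (by simp)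
          · simp [e]

theorem pvP_eq (l : List Char) (b : Int × Char) (rest : List (Int × Char))
    (h : pvOx l = b :: rest) : pvP l = pvPairs b.2 b.1 rest := by
  unfold pvP
  rw [h, pvPairs]
  have : pvIsOX 'A' = false := by decide
  simp [this]

theorem pv_ox_isOX {l : List Char} {p : Int × Char} (h : p ∈ pvOx l) : pvIsOX p.2 = true := by
  simpa using (List.mem_filter.mp h).2

theorem pvCnt_nil : pvCnt ([] : List (Int × Int)) = 0 := rfl
theorem pvS1_nil : pvS1 ([] : List (Int × Int)) = 0 := rfl
theorem pvSq_nil : pvSq ([] : List (Int × Int)) = 0 := rfl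
theorem pvS2_nil : pvS2 ([] : List (Int × Int)) = 0 := rfl

theorem pvCnt_single (p : Int × Int) : pvCnt [p] = 1 := rfl
theorem pvS1_single (p : Int × Int) : pvS1 [p] = p.1 + 1 := by simp [pvS1]
theorem pvSq_single (p : Int × Int) : pvSq [p] = p.2 := by simp [pvSq]
theorem pvS2_single (p : Int × Int) : pvS2 [p] = (p.1 + 1) * p.2 := by simp [pvS2]

theorem pvCnt_cons (p : Int × Int) (ps : List (Int × Int)) : pvCnt (p :: ps) = pvCnt ps + 1 := by
  simp [pvCnt]
theorem pvS1_cons (p : Int × Int) (ps : List (Int × Int)) : pvS1 (p :: ps) = p.1 + 1 + pvS1 ps := by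
  simp [pvS1]
theorem pvSq_cons (p : Int × Int) (ps : List (Int × Int)) : pvSq (p :: ps) = p.2 + pvSq ps := by
  simp [pvSq]
theorem pvS2_cons (p : Int × Int) (ps : List (Int × Int)) : pvS2 (p :: ps) = (p.1 + 1) * p.2 + pvS2 ps := by
  simp [pvS2]

theorem pvCnt_append (a b : List (Int × Int)) : pvCnt (a ++ b) = pvCnt a + pvCnt b := by
  simp [pvCnt]
theorem pvS1_append (a b : List (Int × Int)) : pvS1 (a ++ b) = pvS1 a + pvS1 b := by
  simp [pvS1]
theorem pvSq_append (a b : List (Int × Int)) : pvSq (a ++ b) = pvSq a + pvSq b := by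
  simp [pvSq]
theorem pvS2_append (a b : List (Int × Int)) : pvS2 (a ++ b) = pvS2 a + pvS2 b := by
  simp [pvS2]

theorem pvCnt_shift (n : Int) (ps : List (Int × Int)) : pvCnt (pvShiftP n ps) = pvCnt ps := by
  simp [pvCnt, pvShiftP]
theorem pvS1_shift (n : Int) (ps : List (Int × Int)) :
    pvS1 (pvShiftP n ps) = pvS1 ps + n * pvCnt ps := by
  induction ps with
  | nil => simp [pvS1, pvShiftP, pvCnt]
  | cons p ps ih => simp [pvS1, pvShiftP, pvCnt] at *; rw [ih]; push_cast; ring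
theorem pvSq_shift (n : Int) (ps : List (Int × Int)) :
    pvSq (pvShiftP n ps) = pvSq ps + n * pvCnt ps := by
  induction ps with
  | nil => simp [pvSq, pvShiftP, pvCnt]
  | cons p ps ih => simp [pvSq, pvShiftP, pvCnt] at *; rw [ih]; push_cast; ring
theorem pvS2_shift (n : Int) (ps : List (Int × Int)) :
    pvS2 (pvShiftP n ps) = pvS2 ps + n * pvS1 ps + n * pvSq ps + n * n * pvCnt ps := by
  induction ps with
  | nil => simp [pvS2, pvShiftP, pvS1, pvSq, pvCnt]
  | cons p ps ih => simp [pvS2, pvShiftP, pvS1, pvSq, pvCnt] at *; rw [ih]; push_cast; ring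

theorem pv_zmod (a b : Int) (h : (a : ZMod 1000000007) = (b : ZMod 1000000007)) :
    a % pvMOD = b % pvMOD := by
  have h2 : a ≡ b [ZMOD (1000000007 : ℕ)] := (ZMod.intCast_eq_intCast_iff' a b 1000000007).mp h
  have h3 : a % ((1000000007 : ℕ) : Int) = b % ((1000000007 : ℕ) : Int) := h2
  simpa [pvMOD] using h3

theorem pv_castmod (x : Int) : ((x % pvMOD : Int) : ZMod 1000000007) = (x : ZMod 1000000007) := by
  have := ZMod.intCast_mod x 1000000007
  simpa [pvMOD] using this

theorem pv_step_dot (l : List Char) (st : PvB) (h : pvInv l st) :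
    pvInv (l ++ l) (pvStepB st '.') := by
  obtain ⟨hL, hk, ht1, htq, ht2, hf, hla⟩ := h
  rcases h0 : pvOx l with _ | ⟨b, rest⟩
  · have hfn : st.first = none := by rw [hf, h0]; rfl
    have hln : st.last = none := by rw [hla, h0]; rfl
    have hox2 : pvOx (l ++ l) = [] := by rw [pv_ox_append, h0]; rfl
    have hP : pvP l = [] := by unfold pvP; rw [h0]; rfl
    have hP2 : pvP (l ++ l) = [] := by unfold pvP; rw [hox2]; rfl
    have hstep : pvStepB st '.' = ⟨(2 * st.L) % pvMOD, (2 * st.k) % pvMOD,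
        (2 * st.t1 + st.k * st.L) % pvMOD, (2 * st.tq + st.k * st.L) % pvMOD,
        (2 * st.t2 + st.L * st.t1 + st.L * st.tq + st.k * st.L * st.L) % pvMOD,
        none, none⟩ := by
      simp [pvStepB, hln, hfn, pvmod_eq]
    rw [hstep]
    have hz : ∀ a : Int, a % pvMOD = 0 → (2 * (a % pvMOD)) % pvMOD = 0 := by
      intro a ha; rw [ha]; norm_num
    refine ⟨?_, ?_, ?_, ?_, ?_, ?_, ?_⟩ <;>
      simp [hL, hk, ht1, htq, ht2, hP, hP2, hox2, pvCnt, pvS1, pvSq, pvS2] <;>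
      (apply pv_zmod; push_cast [pv_castmod, pvCnt_nil, pvS1_nil, pvSq_nil, pvS2_nil]; ring)
  · rcases e : (pvOx l).getLast? with _ | g
    · rw [List.getLast?_eq_none_iff, h0] at e; cases e
    have hgOX : pvIsOX g.2 = true := pv_ox_isOX (List.mem_of_getLast? e)
    have hfs : st.first = some (b.2, b.1 % pvMOD) := by rw [hf, h0]; rfl
    have hls : st.last = some (g.2, g.1 % pvMOD) := by rw [hla, e]; rfl
    have e' : (b :: rest).getLast? = some g := by rw [← h0]; exact e
    have hPl : pvP l = pvPairs b.2 b.1 rest := pvP_eq l b rest h0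
    have hPb : pvPairs 'A' (-1) (b :: rest) = pvP l := by unfold pvP; rw [h0]
    have hox2 : pvOx (l ++ l)
        = (b :: rest) ++ ((b.1 + (l.length : Int), b.2) :: pvShift (l.length : Int) rest) := by
      rw [pv_ox_append, h0]; rfl
    have hPP : pvP (l ++ l) = pvP l ++
        ((if pvIsOX g.2 && b.2 != g.2 then [(g.1, b.1 + (l.length : Int))] else [])
          ++ pvShiftP (l.length : Int) (pvP l)) := by
      show pvPairs 'A' (-1) (pvOx (l ++ l)) = _
      rw [hox2, pv_pairs_append, pv_lastSt_getLast?, e', hPb]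
      show pvP l ++ pvPairs g.2 g.1 _ = _
      congr 1
      show (if pvIsOX g.2 && b.2 != g.2 then [(g.1, b.1 + (l.length : Int))] else [])
          ++ pvPairs b.2 (b.1 + (l.length : Int)) (pvShift (l.length : Int) rest) = _
      rw [pv_pairs_shift, hPl]
    have hhead : (pvOx (l ++ l)).head? = some b := by rw [hox2]; rfl
    have hlast : (pvOx (l ++ l)).getLast? = some (g.1 + (l.length : Int), g.2) := by
      rw [hox2, List.getLast?_append_of_ne_nil _ (by simp)]
      show (pvShift (l.length : Int) (b :: rest)).getLast? = _
      rw [pvShift, List.getLast?_map, e']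
      rfl
    by_cases hbg : b.2 = g.2
    · have hcond : (g.2 != b.2) = false := by simp [hbg]
      have hcond2 : (pvIsOX g.2 && b.2 != g.2) = false := by simp [hbg]
      have hstep : pvStepB st '.' = ⟨(2 * st.L) % pvMOD, (2 * st.k) % pvMOD,
          (2 * st.t1 + st.k * st.L) % pvMOD, (2 * st.tq + st.k * st.L) % pvMOD,
          (2 * st.t2 + st.L * st.t1 + st.L * st.tq + st.k * st.L * st.L) % pvMOD,
          st.first, some (g.2, (g.1 % pvMOD + st.L) % pvMOD)⟩ := by
        simp [pvStepB, hls, hfs, hcond, pvmod_eq]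
      rw [hstep]
      refine ⟨?_, ?_, ?_, ?_, ?_, ?_, ?_⟩ <;>
        simp only [hL, hk, ht1, htq, ht2, hPP, hcond2, if_false, List.nil_append,
          pvCnt_append, pvS1_append, pvSq_append, pvS2_append,
          pvCnt_shift, pvS1_shift, pvSq_shift, pvS2_shift,
          pvCnt_nil, pvS1_nil, pvSq_nil, pvS2_nil,
          List.length_append, hfs, hhead, hlast, Option.map_some] <;>
        first
        | (apply pv_zmod; push_cast [pv_castmod, pvCnt_nil, pvS1_nil, pvSq_nil, pvS2_nil]; ring)
        | (refine congrArg some (Prod.ext rfl ?_); apply pv_zmod; push_cast [pv_castmod, pvCnt_nil, pvS1_nil, pvSq_nil, pvS2_nil]; ring)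
        | rfl
    · have hcond : (g.2 != b.2) = true := by simp [bne]; exact fun hq => hbg hq.symm
      have hcond2 : (pvIsOX g.2 && b.2 != g.2) = true := by
        simp [hgOX, bne]; exact hbg
      have hstep : pvStepB st '.' = ⟨(2 * st.L) % pvMOD,
          ((2 * st.k) % pvMOD + 1) % pvMOD,
          ((2 * st.t1 + st.k * st.L) % pvMOD + g.1 % pvMOD + 1) % pvMOD,
          ((2 * st.tq + st.k * st.L) % pvMOD + (b.1 % pvMOD + st.L) % pvMOD) % pvMOD,
          ((2 * st.t2 + st.L * st.t1 + st.L * st.tq + st.k * st.L * st.L) % pvMOD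
            + (g.1 % pvMOD + 1) * ((b.1 % pvMOD + st.L) % pvMOD)) % pvMOD,
          st.first, some (g.2, (g.1 % pvMOD + st.L) % pvMOD)⟩ := by
        simp [pvStepB, hls, hfs, hcond, pvmod_eq]
      rw [hstep]
      refine ⟨?_, ?_, ?_, ?_, ?_, ?_, ?_⟩ <;>
        simp only [hL, hk, ht1, htq, ht2, hPP, hcond2, if_true, List.cons_append,
          List.nil_append, List.append_assoc, List.singleton_append,
          pvCnt_append, pvS1_append, pvSq_append, pvS2_append,
          pvCnt_shift, pvS1_shift, pvSq_shift, pvS2_shift,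
          pvCnt_nil, pvS1_nil, pvSq_nil, pvS2_nil,
          pvCnt_single, pvS1_single, pvSq_single, pvS2_single,
          pvCnt_cons, pvS1_cons, pvSq_cons, pvS2_cons,
          List.length_append, hfs, hhead, hlast, Option.map_some] <;>
        first
        | (apply pv_zmod; push_cast [pv_castmod, pvCnt_nil, pvS1_nil, pvSq_nil, pvS2_nil]; ring)
        | (refine congrArg some (Prod.ext rfl ?_); apply pv_zmod; push_cast [pv_castmod, pvCnt_nil, pvS1_nil, pvSq_nil, pvS2_nil]; ring)
        | rfl

theorem pv_step_snoc (l : List Char) (st : PvB) (c : Char) (hdot : ¬c = '.')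
    (h : pvInv l st) : pvInv (l ++ [c]) (pvStepB st c) := by
  obtain ⟨hL, hk, ht1, htq, ht2, hf, hla⟩ := h
  have hne : (c == '.') = false := by simp [hdot]
  have hA : pvIsOX 'A' = false := by decide
  by_cases hox : pvIsOX c = true
  · have hoxb : (c == 'O' || c == 'X') = true := hox
    have hoxc : pvOx [c] = [((0 : Int), c)] := by
      simp [pvOx, PySem.List.enumerate_cons, PySem.List.enumerate_nil, hox]
    have hox2 : pvOx (l ++ [c]) = pvOx l ++ [((l.length : Int), c)] := by
      rw [pv_ox_append, hoxc]; simp [pvShift]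
    rcases h0 : pvOx l with _ | ⟨b, rest⟩
    · have hfn : st.first = none := by rw [hf, h0]; rfl
      have hln : st.last = none := by rw [hla, h0]; rfl
      have hP : pvP l = [] := by unfold pvP; rw [h0]; rfl
      have hP2 : pvP (l ++ [c]) = [] := by
        unfold pvP; rw [hox2, h0]; simp [pvPairs, hA]
      have hstep : pvStepB st c = ⟨(st.L + 1) % pvMOD, st.k, st.t1, st.tq, st.t2,
          some (c, st.L), some (c, st.L)⟩ := by
        simp [pvStepB, hne, hoxb, hln, hfn, pvmod_eq]
      rw [hstep]
      refine ⟨?_, ?_, ?_, ?_, ?_, ?_, ?_⟩ <;>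
        simp only [hL, hk, ht1, htq, ht2, hP, hP2, hox2, h0, List.nil_append,
          List.head?_cons, List.getLast?_singleton, Option.map_some] <;>
        first
        | (apply pv_zmod; push_cast [pv_castmod, List.length_append, List.length_singleton]; ring)
        | rfl
    · rcases e : (pvOx l).getLast? with _ | g
      · rw [List.getLast?_eq_none_iff, h0] at e; cases e
      have hgOX : pvIsOX g.2 = true := pv_ox_isOX (List.mem_of_getLast? e)
      have hfs : st.first = some (b.2, b.1 % pvMOD) := by rw [hf, h0]; rfl
      have hls : st.last = some (g.2, g.1 % pvMOD) := by rw [hla, e]; rfl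
      have e' : (b :: rest).getLast? = some g := by rw [← h0]; exact e
      have hPb : pvPairs 'A' (-1) (b :: rest) = pvP l := by unfold pvP; rw [h0]
      have hPP : pvP (l ++ [c]) = pvP l ++
          (if pvIsOX g.2 && c != g.2 then [(g.1, (l.length : Int))] else []) := by
        show pvPairs 'A' (-1) (pvOx (l ++ [c])) = _
        rw [hox2, h0, pv_pairs_append, pv_lastSt_getLast?, e', hPb]
        congr 1
        simp [pvPairs]
      have hhead : (pvOx (l ++ [c])).head? = some b := by rw [hox2, h0]; rfl
      have hlast : (pvOx (l ++ [c])).getLast? = some (((l.length : Int)), c) := by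
        rw [hox2, List.getLast?_concat]
      by_cases hbg : c = g.2
      · have hcond : (g.2 != c) = false := by simp [hbg]
        have hcond2 : (pvIsOX g.2 && c != g.2) = false := by simp [hbg]
        have hstep : pvStepB st c = ⟨(st.L + 1) % pvMOD, st.k, st.t1, st.tq, st.t2,
            some (b.2, b.1 % pvMOD), some (c, st.L)⟩ := by
          simp [pvStepB, hne, hoxb, hls, hfs, hcond, pvmod_eq]
        rw [hstep]
        refine ⟨?_, ?_, ?_, ?_, ?_, ?_, ?_⟩ <;>
          simp only [hL, hk, ht1, htq, ht2, hPP, hcond2, Bool.false_eq_true, if_false, List.append_nil,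
            hfs, hhead, hlast, Option.map_some] <;>
          first
          | (apply pv_zmod; push_cast [pv_castmod, List.length_append, List.length_singleton]; ring)
          | rfl
      · have hcond : (g.2 != c) = true := by simp [bne]; exact fun hq => hbg hq.symm
        have hcond2 : (pvIsOX g.2 && c != g.2) = true := by simp [hgOX, bne]; exact hbg
        have hstep : pvStepB st c = ⟨(st.L + 1) % pvMOD,
            (st.k + 1) % pvMOD, (st.t1 + g.1 % pvMOD + 1) % pvMOD,
            (st.tq + st.L) % pvMOD, (st.t2 + (g.1 % pvMOD + 1) * st.L) % pvMOD,
            some (b.2, b.1 % pvMOD), some (c, st.L)⟩ := by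
          simp [pvStepB, hne, hoxb, hls, hfs, hcond, pvmod_eq]
        rw [hstep]
        refine ⟨?_, ?_, ?_, ?_, ?_, ?_, ?_⟩ <;>
          simp only [hL, hk, ht1, htq, ht2, hPP, hcond2, if_true,
            pvCnt_append, pvS1_append, pvSq_append, pvS2_append,
            pvCnt_single, pvS1_single, pvSq_single, pvS2_single,
            hfs, hhead, hlast, Option.map_some] <;>
          first
          | (apply pv_zmod; push_cast [pv_castmod, List.length_append, List.length_singleton]; ring)
          | rfl
  · have hoxb : (c == 'O' || c == 'X') = false := by
      simpa [pvIsOX] using hox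
    have hoxc : pvOx [c] = [] := by
      simp [pvOx, PySem.List.enumerate_cons, PySem.List.enumerate_nil, hox]
    have hox2 : pvOx (l ++ [c]) = pvOx l := by
      rw [pv_ox_append, hoxc]; simp [pvShift]
    have hP2 : pvP (l ++ [c]) = pvP l := by unfold pvP; rw [hox2]
    have hstep : pvStepB st c = { st with L := (st.L + 1) % pvMOD } := by
      simp [pvStepB, hne, hoxb, pvmod_eq]
    rw [hstep]
    refine ⟨?_, ?_, ?_, ?_, ?_, ?_, ?_⟩ <;>
      simp only [hL, hk, ht1, htq, ht2, hP2, hox2, hf, hla] <;>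
      first
      | (apply pv_zmod; push_cast [pv_castmod, List.length_append, List.length_singleton]; ring)
      | rfl

theorem pv_step (l : List Char) (st : PvB) (c : Char) (h : pvInv l st) :
    pvInv (if c == '.' then l ++ l else l ++ [c]) (pvStepB st c) := by
  by_cases hdot : c = '.'
  · subst hdot
    simpa using pv_step_dot l st h
  · have hne : (c == '.') = false := by simp [hdot]
    simp only [hne, Bool.false_eq_true, if_false]
    exact pv_step_snoc l st c hdot h

theorem pv_fold (cs : List Char) : ∀ (l : List Char) (st : PvB), pvInv l st →
    pvInv (cs.foldl (fun (s2 : List Char) c => if c == '.' then s2 ++ s2 else s2 ++ [c]) l)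
          (cs.foldl pvStepB st) := by
  induction cs with
  | nil => intro l st h; simpa using h
  | cons c cs ih =>
      intro l st h
      simpa using ih _ _ (pv_step l st c h)

theorem pvInv_nil : pvInv [] ⟨0, 0, 0, 0, 0, none, none⟩ := by
  refine ⟨?_, ?_, ?_, ?_, ?_, ?_, ?_⟩ <;>
    simp [pvOx, pvP, pvPairs, pvCnt, pvS1, pvSq, pvS2, PySem.List.enumerate]

-- ===== VERDICT (by name: the statement is the Claim_ definition above) =====
theorem solveBrute_spec : Claim_equal_solveBrute := by
  intro N S _
  unfold Spec_solveBrute solveBrute solveBrute_alt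
  have h := pv_fold S.toList [] ⟨0, 0, 0, 0, 0, none, none⟩ pvInv_nil
  set l := S.toList.foldl (fun (s2 : List Char) c => if c == '.' then s2 ++ s2 else s2 ++ [c]) [] with hl
  set st := S.toList.foldl pvStepB ⟨0, 0, 0, 0, 0, none, none⟩ with hst
  obtain ⟨hL, hk, ht1, htq, ht2, _, _⟩ := h
  rw [pv_solveA2, pvmod_eq, hL, ht1, ht2]
  conv_rhs => rw [Int.sub_emod, Int.mul_emod, pv_emod_emod, pv_emod_emod, pv_emod_emod, ← Int.mul_emod, ← Int.sub_emod]
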